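-- pv_equiv track=rewrite | github.com/alekseivoroshilov/db-course-spydatabase-2021 | cursov_db/db_interface.py | format_agent_mission
-- ===== SOURCE A (Python) =====
-- def format_agent_mission(elements):
--     string = ""
--     i = 0
--     for elem in elements:
--         if i == 0:
--             string += "agent_id: "
--             string += str(elem)
--             string += '\n'
--             i += 1
--             continue
--         elif i == 1:
--             string += "mission_id: "
--             string += str(elem)
--             string += '\n'
--             i += 1
--             continue
--         elif i == 2:
--             string += "info: "
--             string += str(elem)
--             string += '\n'
--             i += 1
--             continue
--         elif i == 3:
--             string += "date_from: "
--             string += str(elem)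
--             string += '\n'
--             i += 1
--             continue
--         elif i == 4:
--             string += "date_to: "
--             string += str(elem)
--             string += '\n\n'
--             i = 0
--             continue
--     return string
-- ===== SOURCE B (Python) =====
-- LABELS = ("agent_id", "mission_id", "info", "date_from", "date_to")
--
-- def format_agent_mission(elements):
--     # Process the input in blocks of five: each full block becomes five
--     # labeled lines joined by '\n' and terminated by '\n\n'; a trailing
--     # partial block gets one '\n' per line.
--     parts = []
--     i = 0
--     n = len(elements)
--     while i < n:
--         group = elements[i:i+5]
--         block = "\n".join(l + ": " + str(e) for l, e in zip(LABELS, group))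
--         parts.append(block + ("\n\n" if len(group) == 5 else "\n"))
--         i += 5
--     return "".join(parts)
-- ===== Notes on version B (the rewrite author's own statement) =====
-- stated objective: alternative
-- what changed: Replaces the per-element five-branch counter cascade by chunking the list into blocks of five, rendering each block as zip(labels, group) joined with '\n' plus a '\n\n' (or '\n' for a partial tail) terminator.
import Mathlib
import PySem

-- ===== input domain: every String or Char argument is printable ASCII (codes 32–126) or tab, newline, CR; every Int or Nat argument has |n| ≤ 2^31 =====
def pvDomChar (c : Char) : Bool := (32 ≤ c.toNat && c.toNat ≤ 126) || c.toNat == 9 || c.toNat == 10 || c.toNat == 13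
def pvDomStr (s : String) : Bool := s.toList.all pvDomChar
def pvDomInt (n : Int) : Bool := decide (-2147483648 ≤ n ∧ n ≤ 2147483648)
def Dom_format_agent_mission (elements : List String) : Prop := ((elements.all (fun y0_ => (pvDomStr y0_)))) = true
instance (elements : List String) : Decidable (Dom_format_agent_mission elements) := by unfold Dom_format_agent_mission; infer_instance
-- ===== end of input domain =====

-- B replaces A's per-element five-branch counter cascade by chunking the input into blocks
-- of five, rendering each block via zip(labels, group) joined with '\n'; objective: alternative.

-- ===== PORT A =====
-- the body of A's for-loop: state = (string, i)
def pvStepA (st : String × Nat) (elem : String) : String × Nat :=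
  if st.2 = 0 then (st.1 ++ "agent_id: " ++ elem ++ "\n", st.2 + 1)
  else if st.2 = 1 then (st.1 ++ "mission_id: " ++ elem ++ "\n", st.2 + 1)
  else if st.2 = 2 then (st.1 ++ "info: " ++ elem ++ "\n", st.2 + 1)
  else if st.2 = 3 then (st.1 ++ "date_from: " ++ elem ++ "\n", st.2 + 1)
  else if st.2 = 4 then (st.1 ++ "date_to: " ++ elem ++ "\n\n", 0)
  else st

def format_agent_mission (elements : List String) : String :=
  (elements.foldl pvStepA ("", 0)).1

-- ===== PORT B =====
def pvLabels : List String := ["agent_id", "mission_id", "info", "date_from", "date_to"]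

-- "\n".join(l + ": " + str(e) for l, e in zip(LABELS, group))
def pvBlock (group : List String) : String :=
  PySem.Str.join "\n" ((pvLabels.zip group).map (fun p => p.1 ++ ": " ++ p.2))

-- one iteration of Source B's while-loop body: group = elements[i:i+5], the appended part
def pvPart (elements : List String) (i : Nat) : String :=
  let group := PySem.List.slice elements (some (i : Int)) (some ((i : Int) + 5))
  pvBlock group ++ (if group.length = 5 then "\n\n" else "\n")

-- the while-loop itself (i < n, i += 5), collecting `parts`
def pvAux (elements : List String) (n i : Nat) : List String :=
  if i < n then pvPart elements i :: pvAux elements n (i + 5) else []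
termination_by n - i

def format_agent_mission_alt (elements : List String) : String :=
  PySem.Str.join "" (pvAux elements elements.length 0)

-- ===== PRECONDITION & SPEC =====
def Spec_format_agent_mission (elements : List String) (out : String) : Prop := out = format_agent_mission_alt elements
instance (elements : List String) (out : String) : Decidable (Spec_format_agent_mission elements out) := by unfold Spec_format_agent_mission; infer_instance

-- ===== CLAIM (what is proved, stated in full; the proofs are below) =====
def Claim_equal_format_agent_mission : Prop := ∀ (elements : List String), Dom_format_agent_mission elements → Spec_format_agent_mission elements (format_agent_mission elements)

-- ===== LEMMAS AND PROOFS =====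

-- common recursive characterisation: remaining elements, counter c (< 5)
def pvG : List String → Nat → String
  | [], _ => ""
  | e :: es, c =>
      pvLabels.getD c "" ++ ": " ++ e ++ (if c = 4 then "\n\n" else "\n") ++
        pvG es (if c = 4 then 0 else c + 1)

-- proof scaffolding: B's chunking expressed structurally (take 5 / drop 5 on the suffix)
def pvTD : List String → String
  | [] => ""
  | e :: es =>
      pvBlock ((e :: es).take 5) ++
        (if ((e :: es).take 5).length = 5 then "\n\n" else "\n") ++
        pvTD ((e :: es).drop 5)
termination_by xs => xs.length
decreasing_by simp

theorem pvA_eq_g (es : List String) : ∀ (s : String) (c : Nat), c < 5 →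
    (es.foldl pvStepA (s, c)).1 = s ++ pvG es c := by
  induction es with
  | nil => intro s c _; simp [pvG]
  | cons e es ih =>
      intro s c hc
      interval_cases c <;>
        simp [List.foldl_cons, pvStepA, pvG, ih, String.append_assoc] <;> rfl

theorem pvTD_eq_g (es : List String) : pvTD es = pvG es 0 := by
  induction es using pvTD.induct with
  | case1 => simp [pvTD, pvG]
  | case2 e es ih =>
      rw [pvTD]
      match es with
      | [] =>
          simp [pvBlock, pvLabels, pvG, pvTD, PySem.Str.join, PySem.Chars.join,
            List.intercalate]
          apply String.ext
          simp [String.toList_ofList]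
      | [b] =>
          simp [pvBlock, pvLabels, pvG, pvTD, PySem.Str.join, PySem.Chars.join,
            List.intercalate]
          apply String.ext
          simp [String.toList_ofList]
      | [b, c] =>
          simp [pvBlock, pvLabels, pvG, pvTD, PySem.Str.join, PySem.Chars.join,
            List.intercalate]
          apply String.ext
          simp [String.toList_ofList]
      | [b, c, d] =>
          simp [pvBlock, pvLabels, pvG, pvTD, PySem.Str.join, PySem.Chars.join,
            List.intercalate]
          apply String.ext
          simp [String.toList_ofList]
      | b :: c :: d :: f :: rest =>
          simp only [List.take, List.drop, List.length] at ih ⊢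
          rw [ih]
          simp [pvBlock, pvLabels, pvG, PySem.Str.join, PySem.Chars.join,
            List.intercalate]
          apply String.ext
          simp [String.toList_ofList]

theorem pvJoinEmpty_cons (x : String) (xs : List String) :
    PySem.Str.join "" (x :: xs) = x ++ PySem.Str.join "" xs := by
  cases xs <;>
    simp [PySem.Str.join, PySem.Chars.join, List.intercalate,
      String.ofList_append, String.ofList_toList, String.append_empty]

theorem pvAux_eq_TD (es : List String) : ∀ (i : Nat),
    PySem.Str.join "" (pvAux es es.length i) = pvTD (es.drop i) := by
  intro i
  induction i using pvAux.induct es.length with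
  | case1 i hi ih =>
      rw [pvAux, if_pos hi, pvJoinEmpty_cons, ih]
      have hd : es.drop i ≠ [] := by
        intro h
        have := congrArg List.length h
        simp at this; omega
      match hde : es.drop i with
      | [] => exact absurd hde hd
      | e :: es' =>
          rw [pvTD]
          have hsl : PySem.List.slice es (some (i : Int)) (some ((i : Int) + 5)) =
              (es.drop i).take 5 := by
            have : ((i : Int) + 5) = ((i : Int) + ((5 : Nat) : Int)) := by norm_cast
            rw [this, PySem.List.slice_natCast_add]
          have hdd : es.drop (i + 5) = (es.drop i).drop 5 := by
            rw [List.drop_drop]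
          rw [pvPart, hsl, hde, hdd, hde]
  | case2 i hi =>
      rw [pvAux, if_neg hi]
      have : es.drop i = [] := List.drop_eq_nil_of_le (by omega)
      rw [this, pvTD]
      simp [PySem.Str.join, PySem.Chars.join, List.intercalate]

-- ===== VERDICT (by name: the statement is the Claim_ definition above) =====
theorem format_agent_mission_spec : Claim_equal_format_agent_mission := by
  intro elements _
  unfold Spec_format_agent_mission format_agent_mission format_agent_mission_alt
  rw [pvAux_eq_TD, List.drop_zero, pvTD_eq_g,
    pvA_eq_g elements "" 0 (by omega), String.empty_append]
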